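-- pv_equiv track=rewrite | github.com/jcsesznegi/advent-of-code-2017 | 15/duelingGenerators.py | generatorBPart2
-- ===== SOURCE A (Python) =====
-- def generatorBPart2(value, stop):
--     i = 0
--     while i < stop:
--         value = (value * 48271) % 2147483647
--         while value % 8 != 0:
--             value = (value * 48271) % 2147483647
--         yield value
--         i += 1
-- ===== SOURCE B (Python) =====
-- def generatorBPart2(value, stop):
--     remaining = stop
--     while remaining > 0:
--         block = []
--         for _ in range(256):
--             value = value * 48271 % 2147483647
--             block.append(value)
--         good = [x for x in block if x % 8 == 0]
--         out = good[:remaining]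
--         yield from out
--         remaining -= len(out)
-- ===== Notes on version B (the rewrite author's own statement) =====
-- stated objective: alternative
-- what changed: A's element-wise nested while loops are replaced by staged batch processing: B materialises 256-value blocks of the LCG stream into a list, filters each block with a comprehension, and yields a slice of the filtered block, counting down the remaining quota.
import Mathlib
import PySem

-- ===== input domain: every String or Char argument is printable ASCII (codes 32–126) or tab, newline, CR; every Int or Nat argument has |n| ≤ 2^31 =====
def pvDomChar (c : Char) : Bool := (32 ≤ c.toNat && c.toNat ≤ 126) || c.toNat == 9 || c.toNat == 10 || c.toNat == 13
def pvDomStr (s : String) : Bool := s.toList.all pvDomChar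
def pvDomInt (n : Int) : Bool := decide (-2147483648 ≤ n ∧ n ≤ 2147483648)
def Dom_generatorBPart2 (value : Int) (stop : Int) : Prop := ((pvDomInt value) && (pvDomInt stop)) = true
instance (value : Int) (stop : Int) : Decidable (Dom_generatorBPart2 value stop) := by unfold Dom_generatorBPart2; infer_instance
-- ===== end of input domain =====

-- B replaces A's element-wise nested while loops by staged batch processing:
-- it repeatedly materialises a 256-value block of the LCG stream into a list,
-- filters it with a comprehension, and emits a slice of the filtered block
-- (an alternative decomposition of the same cost; not faster).
-- Both ports carry a fuel counter of total LCG steps solely to be total in Lean;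
-- the fuel budget (stop.toNat * 2147483647) is never reached on actual runs.

-- ===== PORT A =====
-- one LCG step: value = (value * 48271) % 2147483647  (Python %)
def pvStep (v : Int) : Int := PySem.Int.mod (v * 48271) 2147483647

-- inner `while value % 8 != 0` loop of A, fuel = remaining LCG steps;
-- returns the value together with the unspent fuel (none = fuel exhausted)
def pvSkipA : Nat → Int → Option (Int × Nat)
  | f, v =>
    if PySem.Int.mod v 8 = 0 then some (v, f)
    else
      match f with
      | 0 => none
      | f' + 1 => pvSkipA f' (pvStep v)

theorem pvSkipA_le : ∀ (f : Nat) (v w : Int) (f2 : Nat), pvSkipA f v = some (w, f2) → f2 ≤ f := by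
  intro f
  induction f with
  | zero =>
    intro v w f2 h
    unfold pvSkipA at h
    split at h
    · cases h; exact Nat.le_refl _
    · cases h
  | succ f ih =>
    intro v w f2 h
    unfold pvSkipA at h
    split at h
    · cases h; exact Nat.le_refl _
    · exact Nat.le_succ_of_le (ih _ _ _ h)

-- outer `while i < stop` loop of A
def pvAGo (fuel : Nat) (i stp v : Int) : List Int :=
  if i < stp then
    match fuel with
    | 0 => []
    | f + 1 =>
      match h : pvSkipA f (pvStep v) with
      | none => []
      | some (v2, f2) => v2 :: pvAGo f2 (i + 1) stp v2
  else []
termination_by fuel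
decreasing_by exact Nat.lt_succ_of_le (pvSkipA_le _ _ _ _ h)

def generatorBPart2 (value : Int) (stop : Int) : List Int :=
  pvAGo (stop.toNat * 2147483647) 0 stop value

-- ===== PORT B =====
-- Source B's inner `for _ in range(256)` loop: k LCG steps appended to a block list,
-- returning the block and the updated value (k = min 256 fuel; fuel-total only)
def pvBlock : Nat → Int → List Int × Int
  | 0, v => ([], v)
  | k + 1, v =>
    let v' := pvStep v
    let r := pvBlock k v'
    (v' :: r.1, r.2)

-- Source B's outer `while remaining > 0` loop: build a block, filter it, slice it
def pvBGo (fuel : Nat) (remaining : Int) (v : Int) : List Int :=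
  if remaining ≤ 0 then []
  else
    match fuel with
    | 0 => []
    | f + 1 =>
      (((pvBlock (min 256 (f + 1)) v).1.filter
          (fun x => PySem.Int.mod x 8 == 0)).take remaining.toNat) ++
        pvBGo (f + 1 - min 256 (f + 1))
          (remaining - ((((pvBlock (min 256 (f + 1)) v).1.filter
            (fun x => PySem.Int.mod x 8 == 0)).take remaining.toNat).length : Int))
          (pvBlock (min 256 (f + 1)) v).2
termination_by fuel
decreasing_by omega

def generatorBPart2_alt (value : Int) (stop : Int) : List Int :=
  pvBGo (stop.toNat * 2147483647) stop value

-- ===== PRECONDITION & SPEC =====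
def Spec_generatorBPart2 (value : Int) (stop : Int) (out : List Int) : Prop := out = generatorBPart2_alt value stop
instance (value : Int) (stop : Int) (out : List Int) : Decidable (Spec_generatorBPart2 value stop out) := by unfold Spec_generatorBPart2; infer_instance

-- ===== CLAIM =====
def Claim_equal_generatorBPart2 : Prop := ∀ (value : Int) (stop : Int), Dom_generatorBPart2 value stop → Spec_generatorBPart2 value stop (generatorBPart2 value stop)

-- ===== LEMMAS AND PROOFS =====

-- the first f values of the LCG stream from v
def pvStream : Nat → Int → List Int
  | 0, _ => []
  | f + 1, v => pvStep v :: pvStream f (pvStep v)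

-- the value after f LCG steps
def pvIter : Nat → Int → Int
  | 0, v => v
  | f + 1, v => pvIter f (pvStep v)

theorem pvBlock_eq : ∀ (k : Nat) (v : Int), pvBlock k v = (pvStream k v, pvIter k v) := by
  intro k
  induction k with
  | zero => intro v; rfl
  | succ k ih => intro v; simp [pvBlock, pvStream, pvIter, ih]

theorem pvStream_add : ∀ (a b : Nat) (v : Int),
    pvStream (a + b) v = pvStream a v ++ pvStream b (pvIter a v) := by
  intro a
  induction a with
  | zero => intro b v; simp [pvStream, pvIter]
  | succ a ih =>
    intro b v
    have : a + 1 + b = (a + b) + 1 := by omega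
    rw [this]
    simp [pvStream, pvIter, ih]

theorem pvSkipA_mult (f : Nat) (v : Int) (h : PySem.Int.mod v 8 = 0) :
    pvSkipA f v = some (v, f) := by
  rw [pvSkipA.eq_def]
  simp only [if_pos h]

theorem pvSkipA_notmult (f : Nat) (v : Int) (h : ¬ PySem.Int.mod v 8 = 0) :
    pvSkipA (f + 1) v = pvSkipA f (pvStep v) := by
  conv_lhs => rw [pvSkipA.eq_def]
  simp only [if_neg h]

-- A's loop computes: take (stp - i) of the 8-divisible values of the stream prefix
theorem pvA_char : ∀ (f : Nat) (c s v : Int),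
    pvAGo f c s v =
      ((pvStream f v).filter (fun x => PySem.Int.mod x 8 == 0)).take (s - c).toNat := by
  intro f
  induction f using Nat.strong_induction_on with
  | _ f ih =>
    intro c s v
    by_cases hc : c < s
    · cases f with
      | zero =>
        rw [pvAGo.eq_def]
        simp [hc, pvStream]
      | succ g =>
        by_cases h8 : PySem.Int.mod (pvStep v) 8 = 0
        · have hsk := pvSkipA_mult g (pvStep v) h8
          have hb8 : (PySem.Int.mod (pvStep v) 8 == 0) = true := by
            simp only [beq_iff_eq]; exact h8
          have hA : pvAGo (g + 1) c s v = pvStep v :: pvAGo g (c + 1) s (pvStep v) := by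
            rw [pvAGo.eq_def]
            simp only [if_pos hc]
            split
            next heq => rw [hsk] at heq; simp at heq
            next v2 f2 heq =>
              rw [hsk] at heq
              simp only [Option.some.injEq, Prod.mk.injEq] at heq
              obtain ⟨h1, h2⟩ := heq
              subst h1; subst h2; rfl
          have ht : (s - c).toNat = (s - (c + 1)).toNat + 1 := by omega
          rw [hA, ih g (Nat.lt_succ_self g) (c + 1) s (pvStep v), ht]
          conv_rhs => rw [pvStream]
          simp only [List.filter_cons]
          rw [if_pos hb8, List.take_succ_cons]
        · have hb8 : ¬ ((PySem.Int.mod (pvStep v) 8 == 0) = true) := by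
            simp only [beq_iff_eq]; exact h8
          cases g with
          | zero =>
            have hsk : pvSkipA 0 (pvStep v) = none := by
              rw [pvSkipA.eq_def]
              simp only [if_neg h8]
            rw [pvAGo.eq_def]
            simp only [if_pos hc, pvStream]
            split
            next heq => simp only [List.filter_cons, List.filter_nil]; rw [if_neg hb8]; simp
            next v2 f2 heq => rw [hsk] at heq; simp at heq
          | succ g' =>
            have hstep : pvAGo (g' + 1 + 1) c s v = pvAGo (g' + 1) c s (pvStep v) := by
              rw [pvAGo.eq_def]
              conv_rhs => rw [pvAGo.eq_def]
              simp only [if_pos hc]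
              rw [pvSkipA_notmult g' (pvStep v) h8]
            rw [hstep, ih (g' + 1) (Nat.lt_succ_self _) c s (pvStep v)]
            conv_rhs => rw [pvStream]
            simp only [List.filter_cons]
            rw [if_neg hb8]
    · rw [pvAGo.eq_def]
      have ht : (s - c).toNat = 0 := by omega
      simp [hc, ht]

-- B's loop computes: take remaining of the 8-divisible values of the stream prefix
theorem pvB_char : ∀ (f : Nat) (r v : Int),
    pvBGo f r v =
      ((pvStream f v).filter (fun x => PySem.Int.mod x 8 == 0)).take r.toNat := by
  intro f
  induction f using Nat.strong_induction_on with
  | _ f ih =>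
    intro r v
    by_cases hr : r ≤ 0
    · rw [pvBGo.eq_def]
      have ht : r.toNat = 0 := by omega
      simp [hr, ht]
    · cases f with
      | zero =>
        rw [pvBGo.eq_def]
        simp [hr, pvStream]
      | succ g =>
        rw [pvBGo.eq_def]
        simp only [if_neg hr, pvBlock_eq]
        rw [ih (g + 1 - min 256 (g + 1)) (by omega)]
        have hsp : pvStream (g + 1) v =
            pvStream (min 256 (g + 1)) v ++
              pvStream (g + 1 - min 256 (g + 1)) (pvIter (min 256 (g + 1)) v) := by
          conv_lhs => rw [show g + 1 = min 256 (g + 1) + (g + 1 - min 256 (g + 1)) from by omega]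
          exact pvStream_add _ _ _
        conv_rhs => rw [hsp, List.filter_append, List.take_append]
        congr 1
        congr 1
        have hlen : (((pvStream (min 256 (g + 1)) v).filter
            (fun x => PySem.Int.mod x 8 == 0)).take r.toNat).length =
            min r.toNat ((pvStream (min 256 (g + 1)) v).filter
            (fun x => PySem.Int.mod x 8 == 0)).length := by
          simp [List.length_take]
        omega

-- ===== VERDICT =====
theorem generatorBPart2_spec : Claim_equal_generatorBPart2 := by
  intro value stop _
  unfold Spec_generatorBPart2 generatorBPart2 generatorBPart2_alt
  rw [pvA_char, pvB_char]
  simp
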